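-- pv_equiv track=rewrite | github.com/itsolutionscorp/AutoStyle-Clustering | assignments/python/hw4/submissions/untarred3/298.py | filter_subsets
-- ===== SOURCE A (Python) =====
-- def get_list(word):
--     """Returns the list of characters representation of word.
--
--     >>> get_list(make_word_from_string('hello'))
--     ['h', 'e', 'l', 'l', 'o']
--     >>> get_list(make_word_from_list(['w', 'o', 'r', 'l', 'd']))
--     ['w', 'o', 'r', 'l', 'd']
--     """
--     "*** YOUR CODE HERE ***"
--     character_list = []
--     for i in word[0][:]:
--         character_list.append(i)
--     return character_list
--
-- def filter_subsets(word, score, possible_subsets):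
--     """Returns the subsets for which word would get the given score.
--
--     >>> word = make_word_from_string('steal')
--     >>> sub1 = ['a', 'b', 'e', 'l', 's']
--     >>> sub2 = ['b', 'e', 'l', 't', 'z']
--     >>> sub3 = ['s', 't', 'e', 'a', 'l']
--     >>> sub4 = ['b', 'l', 'e', 's', 't']
--     >>> filter_subsets(word, 4, [sub1, sub2, sub3, sub4])
--     [['a', 'b', 'e', 'l', 's'], ['b', 'l', 'e', 's', 't']]
--     """
--     "*** YOUR CODE HERE ***"
--     temp_word_list = get_list(word)
--     subset_list = []
--     score_counter = 0
--     temp_subsets = possible_subsets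
--     for subset in temp_subsets[:]:
--         score_counter = 0
--         for character in temp_word_list:
--             if character in subset:
--                 score_counter += 1
--         if score_counter == score:
--             subset_list.append(subset)
--
--
--     return subset_list
-- ===== SOURCE B (Python) =====
-- def filter_subsets(word, score, possible_subsets):
--     """Returns the subsets for which word would get the given score.
--
--     Inverts A's inner traversal: instead of scanning every character of the
--     word per subset, each subset is scored by summing, over its DISTINCT
--     elements, the number of occurrences of that element among the word's
--     characters.  Correct because the overlap count is symmetric:
--     #{word chars inside subset} = sum over distinct subset elements k of
--     word-chars.count(k).
--     """
--     chars = list(word[0])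
--     return [s for s in possible_subsets
--             if sum(chars.count(k) for k in set(s)) == score]
-- ===== Notes on version B (the rewrite author's own statement) =====
-- stated objective: alternative
-- what changed: B inverts the inner traversal: instead of A's per-subset rescan of every word character testing membership in the subset, B iterates each subset's distinct elements and sums their occurrence counts among the word's characters (overlap counting from the subset's side), with the outer accumulator loop replaced by a comprehension.
import Mathlib
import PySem

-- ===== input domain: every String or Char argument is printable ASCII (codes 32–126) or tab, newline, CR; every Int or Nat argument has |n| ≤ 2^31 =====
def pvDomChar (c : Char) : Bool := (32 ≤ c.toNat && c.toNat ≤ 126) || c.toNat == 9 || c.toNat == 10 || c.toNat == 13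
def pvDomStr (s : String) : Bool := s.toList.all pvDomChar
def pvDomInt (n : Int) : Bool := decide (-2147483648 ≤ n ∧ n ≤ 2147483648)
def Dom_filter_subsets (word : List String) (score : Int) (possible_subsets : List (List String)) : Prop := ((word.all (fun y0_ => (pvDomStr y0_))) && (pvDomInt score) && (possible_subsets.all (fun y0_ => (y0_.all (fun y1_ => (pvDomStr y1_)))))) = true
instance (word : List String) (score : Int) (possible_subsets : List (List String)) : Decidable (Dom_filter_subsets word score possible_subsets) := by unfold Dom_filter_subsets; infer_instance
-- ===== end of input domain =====

-- B scores each subset from the subset's side (sum of word-character counts over the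
-- subset's distinct elements) instead of A's per-word-character membership rescan;
-- return-value equivalence.

-- ===== PORT A =====
-- get_list(word): iterate word[0][:], appending each character (as a 1-char string);
-- none = IndexError on empty word.
def get_list (word : List String) : Option (List String) :=
  (PySem.List.pyGet? word 0).map (fun w0 =>
    w0.toList.foldl (fun acc i => acc ++ [String.mk [i]]) [])

def filter_subsets (word : List String) (score : Int) (possible_subsets : List (List String)) : List (List String) :=
  match get_list word with
  | none => []   -- unreachable under Pre_ (word ≠ []): Python raises IndexError
  | some temp_word_list =>
    possible_subsets.foldl (fun subset_list subset =>
      let score_counter : Int :=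
        temp_word_list.foldl (fun c character => if character ∈ subset then c + 1 else c) 0
      if score_counter = score then subset_list ++ [subset] else subset_list) []

-- ===== PORT B =====
def filter_subsets_alt (word : List String) (score : Int) (possible_subsets : List (List String)) : List (List String) :=
  match PySem.List.pyGet? word 0 with
  | none => []   -- unreachable under Pre_ (word ≠ []): Python raises IndexError
  | some w0 =>
    let chars : List String := w0.toList.map (fun c => String.mk [c])  -- list(word[0])
    -- sum over set(s): order-independent (a sum), so iterating the Set's list is exact
    possible_subsets.filter (fun s =>
      decide ((((PySem.Set.ofList s).map (fun k => ((chars.count k : Nat) : Int))).sum) = score))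

-- ===== PRECONDITION & SPEC =====
-- Pre_ excludes only the empty word list, on which A raises IndexError (word[0]).
def Pre_filter_subsets (word : List String) (score : Int) (possible_subsets : List (List String)) : Prop := word ≠ []
instance (word : List String) (score : Int) (possible_subsets : List (List String)) : Decidable (Pre_filter_subsets word score possible_subsets) := by unfold Pre_filter_subsets; infer_instance
def pvWitness_filter_subsets : List String × Int × List (List String) :=
  (["steal"], 4, [["a","b","e","l","s"], ["b","e","l","t","z"], ["s","t","e","a","l"], ["b","l","e","s","t"]])

def Spec_filter_subsets (word : List String) (score : Int) (possible_subsets : List (List String)) (out : List (List String)) : Prop := out = filter_subsets_alt word score possible_subsets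
instance (word : List String) (score : Int) (possible_subsets : List (List String)) (out : List (List String)) : Decidable (Spec_filter_subsets word score possible_subsets out) := by unfold Spec_filter_subsets; infer_instance

-- ===== CLAIM (what is proved, stated in full; the proofs are below) =====
def Claim_equal_filter_subsets : Prop := ∀ (word : List String) (score : Int) (possible_subsets : List (List String)), Dom_filter_subsets word score possible_subsets → Pre_filter_subsets word score possible_subsets → Spec_filter_subsets word score possible_subsets (filter_subsets word score possible_subsets)

-- ===== LEMMAS AND PROOFS =====

-- Over a Nodup key list: the number of occurrences of c among the keys, as a 0/1 sum.
theorem sum_count_single (ks : List String) (c : String) (hnd : ks.Nodup) :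
    (ks.map (fun k => if c = k then (1 : Int) else 0)).sum = if c ∈ ks then 1 else 0 := by
  induction ks with
  | nil => simp
  | cons k ks ih =>
    have hk : k ∉ ks := (List.nodup_cons.mp hnd).1
    have ih' := ih (List.nodup_cons.mp hnd).2
    by_cases hc : c = k
    · subst hc
      simp [ih', hk]
    · simp [hc, ih']

-- Counting word characters that lie in ks = summing, over the distinct keys ks,
-- each key's occurrence count among the word characters.
theorem countP_eq_keySum (ks : List String) (hnd : ks.Nodup) :
    ∀ (cs : List String),
      (ks.map (fun k => ((cs.count k : Nat) : Int))).sum = ((cs.countP (fun x => x ∈ ks) : Nat) : Int) := by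
  intro cs
  induction cs with
  | nil => simp
  | cons c cs ih =>
    have hsplit : (ks.map (fun k => ((List.count k (c :: cs) : Nat) : Int)))
        = ks.map (fun k => ((cs.count k : Nat) : Int) + (if c = k then 1 else 0)) := by
      apply List.map_congr_left
      intro k _
      by_cases hc : c = k
      · subst hc; simp [List.count_cons_self]
      · have : (c == k) = false := by simpa using hc
        simp [List.count_cons, this, hc]
    rw [hsplit]
    have : (ks.map (fun k => ((cs.count k : Nat) : Int) + (if c = k then 1 else 0))).sum
        = (ks.map (fun k => ((cs.count k : Nat) : Int))).sum
          + (ks.map (fun k => if c = k then (1 : Int) else 0)).sum := by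
      induction ks with
      | nil => simp
      | cons a l ihl => simp [ihl]; ring
    rw [this, ih, sum_count_single ks c hnd]
    by_cases hm : c ∈ ks
    · simp [List.countP_cons, hm]
    · simp [List.countP_cons, hm]

-- The overlap score, computed from the subset's side: summing each distinct subset
-- element's occurrence count among the word characters equals A's membership count.
theorem overlap_eq (s cs : List String) :
    ((PySem.Set.ofList s).map (fun k => ((cs.count k : Nat) : Int))).sum
      = ((cs.countP (fun x => x ∈ s) : Nat) : Int) := by
  rw [countP_eq_keySum (PySem.Set.ofList s) (PySem.Set.nodup_ofList s) cs]
  congr 1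
  apply List.countP_congr
  intro x _
  simp [PySem.Set.mem_ofList]

-- ===== VERDICT (by name: the statement is the Claim_ definition above) =====
theorem filter_subsets_spec : Claim_equal_filter_subsets := by
  intro word score possible_subsets _ hpre
  unfold Spec_filter_subsets filter_subsets filter_subsets_alt get_list
  obtain ⟨w0, rest, rfl⟩ : ∃ w0 rest, word = w0 :: rest := by
    cases word with
    | nil => exact absurd rfl hpre
    | cons a l => exact ⟨a, l, rfl⟩
  simp only [PySem.List.pyGet?, PySem.List.pyIdx?]
  norm_num
  rw [show (List.map (fun c => [String.mk [c]]) w0.toList).flatten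
        = w0.toList.map (fun c => String.mk [c]) from by
          induction w0.toList with
          | nil => rfl
          | cons c l ihl => simpa using ihl]
  rw [PySem.List.foldl_append_ite_eq_filter, List.nil_append]
  apply List.filter_congr
  intro s _
  simp only [decide_eq_decide]
  rw [PySem.List.foldl_ite_add_one, overlap_eq s (w0.toList.map (fun c => String.mk [c]))]
  simp
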